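-- pv_equiv track=rewrite | github.com/reg-viz/improve_reg_diff | rect_util.py | marge_rects_if_same_center
-- ===== SOURCE A (Python) =====
-- def intersect(r1, r2, margin_threshold=0):
--     mx1 = max(r1[0], r2[0])
--     mx2 = min(r1[2], r2[2])
--     my1 = max(r1[1], r2[1])
--     my2 = min(r1[3], r2[3])
--     result = mx2 - mx1 + margin_threshold > 0 and my2 - my1 + margin_threshold > 0
--     connected_rect = (min(r1[0], r2[0]), min(r1[1], r2[1]), max(r1[2], r2[2]), max(r1[3], r2[3]))
--     return (result, connected_rect)
--
-- def marge_rects_if_same_center(input_rects, centers, margin_threshold=0):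
--     rects = [(r[0], r[1], r[2], r[3]) for r in input_rects]
--     connected_pairs1 = [[] for i in range(len(rects))]
--     for i in range(len(rects)):
--         r1 = rects[i]
--         for j in range(i + 1, len(rects)):
--             r2 = rects[j]
--             if not centers[i][0] == centers[j][0] or not centers[i][1] == centers[j][1]:
--                 continue
--             result, connected = intersect(r1, r2, margin_threshold)
--             if result:
--                 connected_pairs1[i].append(j)
--                 rects[i] = connected
--                 r1 = connected
--                 rects[j] = connected
--     return [(rects[i], centers[i]) for i in range(len(connected_pairs1)) if len(connected_pairs1[i]) == 0]
-- ===== SOURCE B (Python) =====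
-- def _hit(m, ri, rj):
--     return (min(ri[2], rj[2]) - max(ri[0], rj[0]) + m > 0
--             and min(ri[3], rj[3]) - max(ri[1], rj[1]) + m > 0)
--
--
-- def _union(ri, rj):
--     return (min(ri[0], rj[0]), min(ri[1], rj[1]),
--             max(ri[2], rj[2]), max(ri[3], rj[3]))
--
--
-- def marge_rects_if_same_center(input_rects, centers, margin_threshold=0):
--     n = len(input_rects)
--     rects = [(r[0], r[1], r[2], r[3]) for r in input_rects]
--     groups = {}
--     for i in range(n):
--         groups.setdefault((centers[i][0], centers[i][1]), []).append(i)
--     merged = [False] * n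
--     for idx in groups.values():
--         for a, i in enumerate(idx):
--             for j in idx[a + 1:]:
--                 if _hit(margin_threshold, rects[i], rects[j]):
--                     u = _union(rects[i], rects[j])
--                     rects[i] = u
--                     rects[j] = u
--                     merged[i] = True
--     return [(rects[i], centers[i]) for i in range(n) if not merged[i]]
-- ===== Notes on version B (the rewrite author's own statement) =====
-- stated objective: faster
-- what changed: B first groups rectangle indices by center with one dict pass, then runs the ordered pairwise merge only inside each center group (no O(n^2) scan over cross-center pairs, no per-i running r1, booleans instead of lists of partner indices), filtering the output by a merged flag.
import Mathlib
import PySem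

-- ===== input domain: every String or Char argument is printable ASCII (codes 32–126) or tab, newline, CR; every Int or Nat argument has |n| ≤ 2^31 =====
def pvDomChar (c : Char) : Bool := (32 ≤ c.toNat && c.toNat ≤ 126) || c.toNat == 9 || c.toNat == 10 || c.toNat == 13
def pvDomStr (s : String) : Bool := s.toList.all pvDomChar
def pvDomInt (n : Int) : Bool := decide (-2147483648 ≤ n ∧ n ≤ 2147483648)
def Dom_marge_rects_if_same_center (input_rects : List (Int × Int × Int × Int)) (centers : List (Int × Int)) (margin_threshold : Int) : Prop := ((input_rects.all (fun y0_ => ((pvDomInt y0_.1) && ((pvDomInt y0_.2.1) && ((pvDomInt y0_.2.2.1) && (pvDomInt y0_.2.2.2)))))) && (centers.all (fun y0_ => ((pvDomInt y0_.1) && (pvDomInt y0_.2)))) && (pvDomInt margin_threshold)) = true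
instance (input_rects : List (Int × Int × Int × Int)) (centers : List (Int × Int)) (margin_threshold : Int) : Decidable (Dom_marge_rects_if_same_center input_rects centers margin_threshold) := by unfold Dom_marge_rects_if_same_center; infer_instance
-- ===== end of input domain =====

-- B replaces A's full O(n^2) double scan (with center-equality `continue` guards) by one
-- dict pass grouping indices by center followed by the ordered pairwise merge inside each
-- group only; return value proved equal on Pre_ (neither version observably mutates inputs).

-- ===== PORT A =====
-- module helper `intersect(r1, r2, margin_threshold)`
def intersectA (r1 r2 : Int × Int × Int × Int) (margin_threshold : Int) :
    Bool × (Int × Int × Int × Int) :=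
  let mx1 := max r1.1 r2.1
  let mx2 := min r1.2.2.1 r2.2.2.1
  let my1 := max r1.2.1 r2.2.1
  let my2 := min r1.2.2.2 r2.2.2.2
  let result := decide (mx2 - mx1 + margin_threshold > 0) && decide (my2 - my1 + margin_threshold > 0)
  let connected := (min r1.1 r2.1, min r1.2.1 r2.2.1, max r1.2.2.1 r2.2.2.1, max r1.2.2.2 r2.2.2.2)
  (result, connected)

-- body of A's inner `for j in range(i+1, len(rects))` loop; state ((rects, connected_pairs1), r1).
-- rects[j] is an always-in-range read, ported with List.getD; centers[i]/centers[j] are in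
-- range under Pre_ (the getD default is never read there).
def pvAInner (centers : List (Int × Int)) (margin_threshold : Int) (i : Nat)
    (t : (List (Int × Int × Int × Int) × List (List Nat)) × (Int × Int × Int × Int)) (j : Nat) :
    (List (Int × Int × Int × Int) × List (List Nat)) × (Int × Int × Int × Int) :=
  if (!((centers.getD i (0, 0)).1 == (centers.getD j (0, 0)).1)) ||
     (!((centers.getD i (0, 0)).2 == (centers.getD j (0, 0)).2)) then t
  else if (intersectA t.2 (t.1.1.getD j (0, 0, 0, 0)) margin_threshold).1 then
    (((t.1.1.set i (intersectA t.2 (t.1.1.getD j (0, 0, 0, 0)) margin_threshold).2).set j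
        (intersectA t.2 (t.1.1.getD j (0, 0, 0, 0)) margin_threshold).2,
      t.1.2.modify i (· ++ [j])),
      (intersectA t.2 (t.1.1.getD j (0, 0, 0, 0)) margin_threshold).2)
  else t

-- body of A's outer `for i in range(len(rects))` loop (`r1 = rects[i]`, then the inner loop)
def pvAOuter (centers : List (Int × Int)) (margin_threshold : Int) (n : Nat)
    (s : List (Int × Int × Int × Int) × List (List Nat)) (i : Nat) :
    List (Int × Int × Int × Int) × List (List Nat) :=
  ((List.range' (i + 1) (n - (i + 1))).foldl (pvAInner centers margin_threshold i)
    (s, s.1.getD i (0, 0, 0, 0))).1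

def marge_rects_if_same_center (input_rects : List (Int × Int × Int × Int)) (centers : List (Int × Int)) (margin_threshold : Int) : List ((Int × Int × Int × Int) × (Int × Int)) :=
  let rects0 := input_rects.map (fun r => (r.1, r.2.1, r.2.2.1, r.2.2.2))
  let n := rects0.length
  let cp0 : List (List Nat) := (List.range n).map (fun _ => [])
  let fs := (List.range n).foldl (pvAOuter centers margin_threshold n) (rects0, cp0)
  ((List.range n).filter (fun i => (fs.2.getD i []).length == 0)).map
    (fun i => (fs.1.getD i (0, 0, 0, 0), centers.getD i (0, 0)))

-- ===== PORT B =====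
-- helper `_hit(m, ri, rj)` of Source B (the overlap test)
def pvHit (m : Int) (ri rj : Int × Int × Int × Int) : Bool :=
  decide (min ri.2.2.1 rj.2.2.1 - max ri.1 rj.1 + m > 0) &&
  decide (min ri.2.2.2 rj.2.2.2 - max ri.2.1 rj.2.1 + m > 0)

-- helper `_union(ri, rj)` of Source B (the merged bounding box)
def pvUni (ri rj : Int × Int × Int × Int) : Int × Int × Int × Int :=
  (min ri.1 rj.1, min ri.2.1 rj.2.1, max ri.2.2.1 rj.2.2.1, max ri.2.2.2 rj.2.2.2)

-- body of Source B's innermost loop: the merge attempt on the index pair p = (i, j);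
-- locals ri = rects[i], rj = rects[j] are inlined as their (in-range) getD reads
def pvPairStep (m : Int) (st : List (Int × Int × Int × Int) × List Bool) (p : Nat × Nat) :
    List (Int × Int × Int × Int) × List Bool :=
  if pvHit m (st.1.getD p.1 (0, 0, 0, 0)) (st.1.getD p.2 (0, 0, 0, 0)) then
    ((st.1.set p.1 (pvUni (st.1.getD p.1 (0, 0, 0, 0)) (st.1.getD p.2 (0, 0, 0, 0)))).set p.2
        (pvUni (st.1.getD p.1 (0, 0, 0, 0)) (st.1.getD p.2 (0, 0, 0, 0))),
      st.2.set p.1 true)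
  else st

def marge_rects_if_same_center_alt (input_rects : List (Int × Int × Int × Int)) (centers : List (Int × Int)) (margin_threshold : Int) : List ((Int × Int × Int × Int) × (Int × Int)) :=
  let n := input_rects.length
  let rects0 := input_rects.map (fun r => (r.1, r.2.1, r.2.2.1, r.2.2.2))
  -- groups.setdefault(c, []).append(i)  =  modify at key c with default []
  let groups : PySem.Dict (Int × Int) (List Nat) :=
    (List.range n).foldl
      (fun d i => d.modify ((centers.getD i (0, 0)).1, (centers.getD i (0, 0)).2) [] (· ++ [i]))
      PySem.Dict.empty
  let st := groups.values.foldl (fun st idx =>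
      (PySem.List.enumerate idx 0).foldl (fun st q =>
        (PySem.List.slice idx (some (q.1 + 1)) none).foldl
          (fun st j => pvPairStep margin_threshold st (q.2, j)) st) st)
    (rects0, List.replicate n false)
  ((List.range n).filter (fun i => !(st.2.getD i false))).map
    (fun i => (st.1.getD i (0, 0, 0, 0), centers.getD i (0, 0)))

-- ===== PRECONDITION & SPEC =====
-- Pre_ excludes exactly the inputs where A raises IndexError: fewer centers than rectangles
-- (centers[i] is read for every rectangle index that reaches the output or a pair scan).
def Pre_marge_rects_if_same_center (input_rects : List (Int × Int × Int × Int)) (centers : List (Int × Int)) (margin_threshold : Int) : Prop :=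
  input_rects.length ≤ centers.length
instance (input_rects : List (Int × Int × Int × Int)) (centers : List (Int × Int)) (margin_threshold : Int) : Decidable (Pre_marge_rects_if_same_center input_rects centers margin_threshold) := by unfold Pre_marge_rects_if_same_center; infer_instance

def pvWitness_marge_rects_if_same_center : (List (Int × Int × Int × Int)) × (List (Int × Int)) × Int :=
  ([(0, 0, 2, 2), (1, 1, 3, 3), (10, 10, 11, 11)], [(1, 1), (1, 1), (10, 10)], 0)

def Spec_marge_rects_if_same_center (input_rects : List (Int × Int × Int × Int)) (centers : List (Int × Int)) (margin_threshold : Int) (out : List ((Int × Int × Int × Int) × (Int × Int))) : Prop := out = marge_rects_if_same_center_alt input_rects centers margin_threshold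
instance (input_rects : List (Int × Int × Int × Int)) (centers : List (Int × Int)) (margin_threshold : Int) (out : List ((Int × Int × Int × Int) × (Int × Int))) : Decidable (Spec_marge_rects_if_same_center input_rects centers margin_threshold out) := by unfold Spec_marge_rects_if_same_center; infer_instance

-- ===== CLAIM (what is proved, stated in full; the proofs are below) =====
def Claim_equal_marge_rects_if_same_center : Prop := ∀ (input_rects : List (Int × Int × Int × Int)) (centers : List (Int × Int)) (margin_threshold : Int), Dom_marge_rects_if_same_center input_rects centers margin_threshold → Pre_marge_rects_if_same_center input_rects centers margin_threshold → Spec_marge_rects_if_same_center input_rects centers margin_threshold (marge_rects_if_same_center input_rects centers margin_threshold)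

-- ===== LEMMAS AND PROOFS =====

-- ---- generic fold machinery ----

/-- Pull one commuting element out of a fold. -/
theorem pv_foldl_comm_single {α S : Type} (f : S → α → S) (a : α) :
    ∀ (l : List α) (s : S), (∀ b ∈ l, ∀ s, f (f s a) b = f (f s b) a) →
      l.foldl f (f s a) = f (l.foldl f s) a := by
  intro l
  induction l with
  | nil => intro s _; rfl
  | cons b t ih =>
    intro s h
    simp only [List.foldl_cons]
    rw [h b (by simp), ih (f s b) (fun c hc s => h c (by simp [hc]) s)]

/-- Run the elements of one key class first, the rest after. -/
theorem pv_foldl_pull {α K S : Type} [BEq K] [LawfulBEq K] (f : S → α → S) (key : α → K) (k : K) :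
    ∀ (l : List α) (s : S),
      (∀ a ∈ l, ∀ b ∈ l, key a ≠ key b → ∀ s, f (f s a) b = f (f s b) a) →
      l.foldl f s =
        (l.filter (fun a => !(key a == k))).foldl f ((l.filter (fun a => key a == k)).foldl f s) := by
  intro l
  induction l with
  | nil => intro s _; rfl
  | cons a t ih =>
    intro s h
    have ht := fun b hb c hc => h b (List.mem_cons_of_mem _ hb) c (List.mem_cons_of_mem _ hc)
    by_cases hk : key a = k
    · simp only [List.foldl_cons, List.filter_cons, hk, beq_self_eq_true, Bool.not_true,
        Bool.false_eq_true, if_false, if_true]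
      exact ih (f s a) ht
    · have hf1 : (a :: t).filter (fun x => key x == k) = t.filter (fun x => key x == k) := by
        simp [hk]
      have hf2 : (a :: t).filter (fun x => !(key x == k)) = a :: t.filter (fun x => !(key x == k)) := by
        simp [hk]
      have hone : (t.filter (fun b => key b == k)).foldl f (f s a) =
          f ((t.filter (fun b => key b == k)).foldl f s) a := by
        apply pv_foldl_comm_single
        intro b hb s'
        have hbk : key b = k := by simpa using (List.of_mem_filter hb)
        exact h a (by simp) b (by simp [List.mem_of_mem_filter hb]) (by simp [hk, hbk]) s'
      rw [hf1, hf2, List.foldl_cons, List.foldl_cons, ih (f s a) ht, hone]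

/-- A fold whose steps commute across key classes may be run key class by key class. -/
theorem pv_foldl_groups {α K S : Type} [BEq K] [LawfulBEq K] (f : S → α → S) (key : α → K) :
    ∀ (ks : List K) (l : List α) (s : S), ks.Nodup → (∀ a ∈ l, key a ∈ ks) →
      (∀ a ∈ l, ∀ b ∈ l, key a ≠ key b → ∀ s, f (f s a) b = f (f s b) a) →
      (ks.flatMap (fun k => l.filter (fun a => key a == k))).foldl f s = l.foldl f s := by
  intro ks
  induction ks with
  | nil =>
    intro l s _ hcov _
    cases l with
    | nil => rfl
    | cons a t => exact absurd (hcov a (by simp)) (by simp)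
  | cons k kt ih =>
    intro l s hnd hcov hcomm
    simp only [List.flatMap_cons, List.foldl_append]
    have hstep : ∀ k' ∈ kt, l.filter (fun a => key a == k') =
        (l.filter (fun a => !(key a == k))).filter (fun a => key a == k') := by
      intro k' hk'
      rw [List.filter_filter]
      apply List.filter_congr
      intro x _
      by_cases hx : key x = k'
      · have hkk : k' ≠ k := by
          rintro rfl
          exact (List.nodup_cons.mp hnd).1 hk'
        simp [hx, hkk]
      · simp [hx]
    have hrest : (kt.flatMap (fun k' => l.filter (fun a => key a == k'))) =
        (kt.flatMap (fun k' => (l.filter (fun a => !(key a == k))).filter (fun a => key a == k'))) :=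
      List.flatMap_congr hstep
    rw [hrest, ih (l.filter (fun a => !(key a == k))) _ (List.nodup_cons.mp hnd).2
      (fun a ha => by
        have hmem := List.mem_of_mem_filter ha
        have hne : ¬ key a = k := by simpa using List.of_mem_filter ha
        have := hcov a hmem
        simp only [List.mem_cons] at this
        exact this.resolve_left hne)
      (fun a ha b hb hne s => hcomm a (List.mem_of_mem_filter ha) b (List.mem_of_mem_filter hb) hne s)]
    exact (pv_foldl_pull f key k l s hcomm).symm

/-- A fold of folds is a fold over the flattened list. -/
theorem pv_foldl_flatMap {α β S : Type} (f : S → α → S) (g : β → List α) :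
    ∀ (l : List β) (s : S), l.foldl (fun s b => (g b).foldl f s) s = (l.flatMap g).foldl f s := by
  intro l
  induction l with
  | nil => intro s; rfl
  | cons b t ih => intro s; simp [List.foldl_append, ih]

-- ---- the ordered pair list of a list of indices ----

def pvPairsOf : List Nat → List (Nat × Nat)
  | [] => []
  | i :: t => t.map (fun j => (i, j)) ++ pvPairsOf t

theorem pv_mem_pairsOf {p : Nat × Nat} : ∀ {l : List Nat}, p ∈ pvPairsOf l → p.1 ∈ l ∧ p.2 ∈ l := by
  intro l
  induction l with
  | nil => simp [pvPairsOf]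
  | cons i t ih =>
    intro h
    simp only [pvPairsOf, List.mem_append, List.mem_map] at h
    rcases h with ⟨j, hj, rfl⟩ | h
    · simp [hj]
    · rcases ih h with ⟨h1, h2⟩; simp [h1, h2]

theorem pv_pairsOf_filter (q : Nat → Bool) :
    ∀ l : List Nat, pvPairsOf (l.filter q) = (pvPairsOf l).filter (fun p => q p.1 && q p.2) := by
  intro l
  induction l with
  | nil => rfl
  | cons i t ih =>
    by_cases hi : q i
    · have hcomp : List.filter ((fun p => q p.1 && q p.2) ∘ fun j => (i, j)) t = List.filter q t := by
        apply List.filter_congr; intro j _; simp [hi]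
      simp only [List.filter_cons, hi, if_true, pvPairsOf, List.filter_append, List.filter_map,
        ih, hcomp]
    · have hcomp : List.filter ((fun p => q p.1 && q p.2) ∘ fun j => (i, j)) t = [] := by
        apply List.filter_eq_nil_iff.mpr
        intro j _
        simp [hi]
      rw [List.filter_cons_of_neg (by simp [hi]), ih]
      conv_rhs => rw [show pvPairsOf (i :: t) = t.map (fun j => (i, j)) ++ pvPairsOf t from rfl]
      rw [List.filter_append, List.filter_map, hcomp]
      simp

-- ---- facts about the shared pair step ----

theorem pv_getD_set_ne {α : Type} (L : List α) (x y : Nat) (v : α) (d : α) (hxy : x ≠ y) :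
    (L.set x v).getD y d = L.getD y d := by
  simp [List.getD_eq_getElem?_getD, List.getElem?_set_ne hxy]

theorem pvPairStep_eq (m : Int) (st : List (Int × Int × Int × Int) × List Bool) (p : Nat × Nat) :
    pvPairStep m st p =
      if pvHit m (st.1.getD p.1 (0, 0, 0, 0)) (st.1.getD p.2 (0, 0, 0, 0)) then
        ((st.1.set p.1 (pvUni (st.1.getD p.1 (0, 0, 0, 0)) (st.1.getD p.2 (0, 0, 0, 0)))).set p.2
            (pvUni (st.1.getD p.1 (0, 0, 0, 0)) (st.1.getD p.2 (0, 0, 0, 0))),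
          st.2.set p.1 true)
      else st := rfl

theorem pv_getD_pvPairStep (m : Int) (st : List (Int × Int × Int × Int) × List Bool)
    (p : Nat × Nat) (x : Nat) (d : Int × Int × Int × Int) (h1 : p.1 ≠ x) (h2 : p.2 ≠ x) :
    (pvPairStep m st p).1.getD x d = st.1.getD x d := by
  unfold pvPairStep
  split
  · rw [pv_getD_set_ne _ _ _ _ _ h2, pv_getD_set_ne _ _ _ _ _ h1]
  · rfl

theorem pv_pvPairStep_sets (m : Int) (L : List (Int × Int × Int × Int)) (F : List Bool)
    (p : Nat × Nat) (x y : Nat) (v w : Int × Int × Int × Int) (c : Bool)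
    (hx1 : x ≠ p.1) (hx2 : x ≠ p.2) (hy1 : y ≠ p.1) (hy2 : y ≠ p.2) :
    pvPairStep m ((L.set x v).set y w, F.set x c) p =
      (((pvPairStep m (L, F) p).1.set x v).set y w, (pvPairStep m (L, F) p).2.set x c) := by
  have e1 : ((L.set x v).set y w).getD p.1 (0, 0, 0, 0) = L.getD p.1 (0, 0, 0, 0) := by
    rw [pv_getD_set_ne _ _ _ _ _ hy1, pv_getD_set_ne _ _ _ _ _ hx1]
  have e2 : ((L.set x v).set y w).getD p.2 (0, 0, 0, 0) = L.getD p.2 (0, 0, 0, 0) := by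
    rw [pv_getD_set_ne _ _ _ _ _ hy2, pv_getD_set_ne _ _ _ _ _ hx2]
  unfold pvPairStep
  simp only [e1, e2]
  split
  · simp only [Prod.mk.injEq]
    refine ⟨?_, List.set_comm c true hx1⟩
    rw [List.set_comm w _ hy1, List.set_comm w _ hy2, List.set_comm v _ hx1,
      List.set_comm v _ hx2]
  · rfl

theorem pvPairStep_comm (m : Int) (a b : Nat × Nat)
    (h1 : a.1 ≠ b.1) (h2 : a.1 ≠ b.2) (h3 : a.2 ≠ b.1) (h4 : a.2 ≠ b.2) (s) :
    pvPairStep m (pvPairStep m s a) b = pvPairStep m (pvPairStep m s b) a := by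
  by_cases hA : pvHit m (s.1.getD a.1 (0, 0, 0, 0)) (s.1.getD a.2 (0, 0, 0, 0)) = true
  · -- a fires: its update is two sets and a flag set at indices disjoint from b
    have ha : pvPairStep m s a =
        ((s.1.set a.1 (pvUni (s.1.getD a.1 (0, 0, 0, 0)) (s.1.getD a.2 (0, 0, 0, 0)))).set a.2
          (pvUni (s.1.getD a.1 (0, 0, 0, 0)) (s.1.getD a.2 (0, 0, 0, 0))), s.2.set a.1 true) := by
      rw [pvPairStep_eq]; rw [if_pos hA]
    have hb' : (pvPairStep m s b).1.getD a.1 (0, 0, 0, 0) = s.1.getD a.1 (0, 0, 0, 0) :=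
      pv_getD_pvPairStep m s b a.1 _ h1.symm h2.symm
    have hb'' : (pvPairStep m s b).1.getD a.2 (0, 0, 0, 0) = s.1.getD a.2 (0, 0, 0, 0) :=
      pv_getD_pvPairStep m s b a.2 _ h3.symm h4.symm
    have hstep : pvPairStep m (pvPairStep m s b) a =
        (((pvPairStep m s b).1.set a.1 (pvUni (s.1.getD a.1 (0, 0, 0, 0)) (s.1.getD a.2 (0, 0, 0, 0)))).set a.2
          (pvUni (s.1.getD a.1 (0, 0, 0, 0)) (s.1.getD a.2 (0, 0, 0, 0))), (pvPairStep m s b).2.set a.1 true) := by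
      rw [pvPairStep_eq m (pvPairStep m s b) a, hb', hb'', if_pos hA]
    rw [ha, hstep]
    have := pv_pvPairStep_sets m s.1 s.2 b a.1 a.2
      (pvUni (s.1.getD a.1 (0, 0, 0, 0)) (s.1.getD a.2 (0, 0, 0, 0)))
      (pvUni (s.1.getD a.1 (0, 0, 0, 0)) (s.1.getD a.2 (0, 0, 0, 0))) true h1 h2 h3 h4
    simpa using this
  · -- a does not fire on s, hence not after b either
    have ha : pvPairStep m s a = s := by rw [pvPairStep_eq]; rw [if_neg hA]
    have hb' : (pvPairStep m s b).1.getD a.1 (0, 0, 0, 0) = s.1.getD a.1 (0, 0, 0, 0) :=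
      pv_getD_pvPairStep m s b a.1 _ h1.symm h2.symm
    have hb'' : (pvPairStep m s b).1.getD a.2 (0, 0, 0, 0) = s.1.getD a.2 (0, 0, 0, 0) :=
      pv_getD_pvPairStep m s b a.2 _ h3.symm h4.symm
    have hstep : pvPairStep m (pvPairStep m s b) a = pvPairStep m s b := by
      rw [pvPairStep_eq m (pvPairStep m s b) a, hb', hb'', if_neg hA]
    rw [ha, hstep]


-- ---- A-side bridge: A's nested loops as a fold of a pair step ----

-- A's inner-loop effect on (rects, connected_pairs1) for the pair p = (i, j)
def pvStepA (centers : List (Int × Int)) (m : Int)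
    (s : List (Int × Int × Int × Int) × List (List Nat)) (p : Nat × Nat) :
    List (Int × Int × Int × Int) × List (List Nat) :=
  if (!((centers.getD p.1 (0, 0)).1 == (centers.getD p.2 (0, 0)).1)) ||
     (!((centers.getD p.1 (0, 0)).2 == (centers.getD p.2 (0, 0)).2)) then s
  else if pvHit m (s.1.getD p.1 (0, 0, 0, 0)) (s.1.getD p.2 (0, 0, 0, 0)) then
    ((s.1.set p.1 (pvUni (s.1.getD p.1 (0, 0, 0, 0)) (s.1.getD p.2 (0, 0, 0, 0)))).set p.2
        (pvUni (s.1.getD p.1 (0, 0, 0, 0)) (s.1.getD p.2 (0, 0, 0, 0))),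
      s.2.modify p.1 (· ++ [p.2]))
  else s

theorem pv_intersectA_fst (r1 r2 : Int × Int × Int × Int) (m : Int) :
    (intersectA r1 r2 m).1 = pvHit m r1 r2 := rfl

theorem pv_intersectA_snd (r1 r2 : Int × Int × Int × Int) (m : Int) :
    (intersectA r1 r2 m).2 = pvUni r1 r2 := rfl

theorem pvStepA_length (centers : List (Int × Int)) (m : Int)
    (s : List (Int × Int × Int × Int) × List (List Nat)) (p : Nat × Nat) :
    (pvStepA centers m s p).1.length = s.1.length ∧
    (pvStepA centers m s p).2.length = s.2.length := by
  unfold pvStepA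
  split
  · simp
  · split <;> simp [List.length_modify]

theorem pvStepA_foldl_length (centers : List (Int × Int)) (m : Int) :
    ∀ (L : List (Nat × Nat)) (s : List (Int × Int × Int × Int) × List (List Nat)),
      ((L.foldl (pvStepA centers m) s).1.length = s.1.length ∧
       (L.foldl (pvStepA centers m) s).2.length = s.2.length) := by
  intro L
  induction L with
  | nil => intro s; exact ⟨rfl, rfl⟩
  | cons p t ih =>
    intro s
    have h := pvStepA_length centers m s p
    have h' := ih (pvStepA centers m s p)
    exact ⟨h'.1.trans h.1, h'.2.trans h.2⟩

-- one pass of A's inner loop body, seen from the (state, r1) pair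
theorem pv_innerA_step (centers : List (Int × Int)) (m : Int) (i j : Nat)
    (s : List (Int × Int × Int × Int) × List (List Nat))
    (hij : i ≠ j) (hi : i < s.1.length) :
    pvAInner centers m i (s, s.1.getD i (0, 0, 0, 0)) j =
      (pvStepA centers m s (i, j), (pvStepA centers m s (i, j)).1.getD i (0, 0, 0, 0)) := by
  unfold pvAInner pvStepA
  simp only [pv_intersectA_fst, pv_intersectA_snd]
  split
  · rfl
  · split
    · simp only [Prod.mk.injEq]
      refine ⟨trivial, ?_⟩
      rw [pv_getD_set_ne _ _ _ _ _ hij.symm]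
      simp [List.getD_eq_getElem?_getD, List.getElem?_set_self hi]
    · rfl

-- A's whole inner loop for fixed i equals the pair fold over the mapped index list
theorem pv_innerA (centers : List (Int × Int)) (m : Int) (i : Nat) :
    ∀ (jl : List Nat) (s : List (Int × Int × Int × Int) × List (List Nat)),
      (∀ j ∈ jl, i ≠ j) → i < s.1.length →
      jl.foldl (pvAInner centers m i) (s, s.1.getD i (0, 0, 0, 0)) =
        ((jl.map (fun j => (i, j))).foldl (pvStepA centers m) s,
         ((jl.map (fun j => (i, j))).foldl (pvStepA centers m) s).1.getD i (0, 0, 0, 0)) := by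
  intro jl
  induction jl with
  | nil => intro s _ _; rfl
  | cons j t ih =>
    intro s hne hi
    simp only [List.foldl_cons, List.map_cons]
    rw [pv_innerA_step centers m i j s (hne j (by simp)) hi]
    exact ih (pvStepA centers m s (i, j)) (fun j' hj' => hne j' (by simp [hj']))
      ((pvStepA_length centers m s (i, j)).1 ▸ hi)

-- A's double loop equals the pair fold over pvPairsOf of the index range
theorem pv_outerA (centers : List (Int × Int)) (m : Int) (n : Nat) :
    ∀ (d k : Nat) (s : List (Int × Int × Int × Int) × List (List Nat)),
      k + d = n → s.1.length = n →
      (List.range' k d).foldl (pvAOuter centers m n) s =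
        (pvPairsOf (List.range' k d)).foldl (pvStepA centers m) s := by
  intro d
  induction d with
  | zero => intro k s _ _; rfl
  | succ d ih =>
    intro k s hk hlen
    rw [List.range'_succ]
    simp only [List.foldl_cons]
    have hout : pvAOuter centers m n s k =
        ((List.range' (k + 1) d).map (fun j => (k, j))).foldl (pvStepA centers m) s := by
      unfold pvAOuter
      have hd : n - (k + 1) = d := by omega
      rw [hd, pv_innerA centers m k (List.range' (k + 1) d) s
        (fun j hj => by have := (List.mem_range'_1.mp hj).1; omega) (by omega)]
    rw [hout]
    rw [show pvPairsOf (k :: List.range' (k + 1) d) =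
        (List.range' (k + 1) d).map (fun j => (k, j)) ++ pvPairsOf (List.range' (k + 1) d) from rfl,
      List.foldl_append]
    exact ih (k + 1) _ (by omega)
      (((pvStepA_foldl_length centers m _ s).1).trans hlen)

-- ---- A-state to B-state abstraction: a list of partners to a merged flag ----

theorem pv_map_modify_append : ∀ (l : List (List Nat)) (i : Nat) (j : Nat),
    (l.modify i (· ++ [j])).map (fun x => !x.isEmpty) =
      (l.map (fun x => !x.isEmpty)).set i true := by
  intro l
  induction l with
  | nil => intro i j; simp
  | cons x t ih =>
    intro i j
    cases i with
    | zero => simp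
    | succ i => simpa using ih i j

theorem pv_phi_step (centers : List (Int × Int)) (m : Int)
    (s : List (Int × Int × Int × Int) × List (List Nat)) (p : Nat × Nat) :
    ((pvStepA centers m s p).1, (pvStepA centers m s p).2.map (fun x => !x.isEmpty)) =
      (if centers.getD p.1 (0, 0) == centers.getD p.2 (0, 0) then
        pvPairStep m (s.1, s.2.map (fun x => !x.isEmpty)) p
      else (s.1, s.2.map (fun x => !x.isEmpty))) := by
  by_cases hc : centers.getD p.1 (0, 0) = centers.getD p.2 (0, 0)
  · have h1 : (centers.getD p.1 (0, 0)).1 = (centers.getD p.2 (0, 0)).1 := by rw [hc]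
    have h2 : (centers.getD p.1 (0, 0)).2 = (centers.getD p.2 (0, 0)).2 := by rw [hc]
    have e1 : ((centers.getD p.1 (0, 0)).1 == (centers.getD p.2 (0, 0)).1) = true :=
      beq_iff_eq.mpr h1
    have e2 : ((centers.getD p.1 (0, 0)).2 == (centers.getD p.2 (0, 0)).2) = true :=
      beq_iff_eq.mpr h2
    have hg : ((!((centers.getD p.1 (0, 0)).1 == (centers.getD p.2 (0, 0)).1)) ||
       (!((centers.getD p.1 (0, 0)).2 == (centers.getD p.2 (0, 0)).2))) = false := by
      rw [e1, e2]; rfl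
    rw [if_pos (show (centers.getD p.1 (0, 0) == centers.getD p.2 (0, 0)) = true by
      simp only [beq_iff_eq]; exact hc)]
    unfold pvStepA
    rw [hg]
    simp only [Bool.false_eq_true, if_false]
    rw [pvPairStep_eq]
    simp only
    split
    · simp [pv_map_modify_append]
    · rfl
  · have hg : ((!((centers.getD p.1 (0, 0)).1 == (centers.getD p.2 (0, 0)).1)) ||
       (!((centers.getD p.1 (0, 0)).2 == (centers.getD p.2 (0, 0)).2))) = true := by
      rcases Decidable.em ((centers.getD p.1 (0, 0)).1 = (centers.getD p.2 (0, 0)).1) with h1 | h1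
      · have h2 : ¬ (centers.getD p.1 (0, 0)).2 = (centers.getD p.2 (0, 0)).2 := by
          intro h2
          exact hc (Prod.ext h1 h2)
        have e2 : ((centers.getD p.1 (0, 0)).2 == (centers.getD p.2 (0, 0)).2) = false :=
          beq_false_of_ne h2
        rw [e2]
        simp
      · have e1 : ((centers.getD p.1 (0, 0)).1 == (centers.getD p.2 (0, 0)).1) = false :=
          beq_false_of_ne h1
        rw [e1]
        simp
    rw [if_neg (show ¬ (centers.getD p.1 (0, 0) == centers.getD p.2 (0, 0)) = true by
      simp only [beq_iff_eq]; exact hc)]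
    unfold pvStepA
    rw [hg]
    simp

theorem pv_phi_fold (centers : List (Int × Int)) (m : Int) :
    ∀ (L : List (Nat × Nat)) (s : List (Int × Int × Int × Int) × List (List Nat)),
      ((L.foldl (pvStepA centers m) s).1,
       (L.foldl (pvStepA centers m) s).2.map (fun x => !x.isEmpty)) =
        (L.filter (fun p => centers.getD p.1 (0, 0) == centers.getD p.2 (0, 0))).foldl
          (pvPairStep m) (s.1, s.2.map (fun x => !x.isEmpty)) := by
  intro L
  induction L with
  | nil => intro s; rfl
  | cons p t ih =>
    intro s
    simp only [List.foldl_cons, List.filter_cons]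
    have hkey := pv_phi_step centers m s p
    by_cases hc : centers.getD p.1 (0, 0) = centers.getD p.2 (0, 0)
    · rw [if_pos (show (centers.getD p.1 (0, 0) == centers.getD p.2 (0, 0)) = true from
        beq_iff_eq.mpr hc)] at hkey
      rw [if_pos (show (centers.getD p.1 (0, 0) == centers.getD p.2 (0, 0)) = true from
        beq_iff_eq.mpr hc), List.foldl_cons, ← hkey]
      exact ih (pvStepA centers m s p)
    · rw [if_neg (show ¬ ((centers.getD p.1 (0, 0) == centers.getD p.2 (0, 0)) = true) from
        fun h => hc (beq_iff_eq.mp h))] at hkey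
      rw [if_neg (show ¬ ((centers.getD p.1 (0, 0) == centers.getD p.2 (0, 0)) = true) from
        fun h => hc (beq_iff_eq.mp h)), ← hkey]
      exact ih (pvStepA centers m s p)

-- ---- B-side bridge: enumerate/slice loops over a group as a fold over its pairs ----

theorem pv_bgroup_aux (m : Int) (full : List Nat) :
    ∀ (d k : Nat) (st : List (Int × Int × Int × Int) × List Bool), k + d = full.length →
      (PySem.List.enumerate (full.drop k) (k : Int)).foldl
        (fun st q => (PySem.List.slice full (some (q.1 + 1)) none).foldl
          (fun st j => pvPairStep m st (q.2, j)) st) st =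
      (pvPairsOf (full.drop k)).foldl (pvPairStep m) st := by
  intro d
  induction d with
  | zero =>
    intro k st hk
    rw [List.drop_of_length_le (by omega)]
    rw [PySem.List.enumerate_nil]
    rfl
  | succ d ih =>
    intro k st hk
    have hklt : k < full.length := by omega
    rw [List.drop_eq_getElem_cons hklt, PySem.List.enumerate_cons]
    simp only [List.foldl_cons]
    have hc1 : ((k : Int) + 1) = ((k + 1 : Nat) : Int) := by push_cast; ring
    rw [hc1, PySem.List.slice_from_natCast]
    have hinner : (List.drop (k + 1) full).foldl (fun st j => pvPairStep m st (full[k], j)) st =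
        ((List.drop (k + 1) full).map (fun j => (full[k], j))).foldl (pvPairStep m) st := by
      rw [List.foldl_map]
    rw [hinner]
    rw [show pvPairsOf (full[k] :: List.drop (k + 1) full) =
      (List.drop (k + 1) full).map (fun j => (full[k], j)) ++ pvPairsOf (List.drop (k + 1) full)
      from rfl, List.foldl_append]
    exact ih (k + 1) _ (by omega)

theorem pv_bgroup (m : Int) (idx : List Nat) (st : List (Int × Int × Int × Int) × List Bool) :
    (PySem.List.enumerate idx 0).foldl
      (fun st q => (PySem.List.slice idx (some (q.1 + 1)) none).foldl
        (fun st j => pvPairStep m st (q.2, j)) st) st =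
    (pvPairsOf idx).foldl (pvPairStep m) st := by
  have := pv_bgroup_aux m idx idx.length 0 st (by omega)
  simpa using this

-- Bool form of "an index list is empty"
theorem pv_len_eq_isEmpty (x : List Nat) : ((x.length == 0) : Bool) = x.isEmpty := by
  cases x <;> simp

-- ===== final assembly =====
theorem pv_main (input_rects : List (Int × Int × Int × Int)) (centers : List (Int × Int))
    (margin_threshold : Int) :
    marge_rects_if_same_center input_rects centers margin_threshold =
      marge_rects_if_same_center_alt input_rects centers margin_threshold := by
  simp only [marge_rects_if_same_center, marge_rects_if_same_center_alt, List.length_map]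
  set n := input_rects.length with hn
  set rects0 := input_rects.map (fun r => (r.1, r.2.1, r.2.2.1, r.2.2.2)) with hrects0
  set key : Nat → Int × Int := fun i => centers.getD i (0, 0) with hkeydef
  -- the common filtered pair list
  set pairsC := (pvPairsOf (List.range n)).filter
    (fun p => centers.getD p.1 (0, 0) == centers.getD p.2 (0, 0)) with hpairsC
  have hr0len : rects0.length = n := by simp [hrects0, hn]
  -- ---------- A side ----------
  have hA1 : (List.range n).foldl (pvAOuter centers margin_threshold n)
        (rects0, (List.range n).map (fun _ => ([] : List Nat))) =
      (pvPairsOf (List.range n)).foldl (pvStepA centers margin_threshold)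
        (rects0, (List.range n).map (fun _ => ([] : List Nat))) := by
    rw [List.range_eq_range']
    exact pv_outerA centers margin_threshold n n 0 _ (by omega) hr0len
  have hA2 := pv_phi_fold centers margin_threshold (pvPairsOf (List.range n))
    (rects0, (List.range n).map (fun _ => ([] : List Nat)))
  have hcp0 : ((List.range n).map (fun _ => ([] : List Nat))).map (fun x => !x.isEmpty) =
      List.replicate n false := by
    simp [List.map_const']
  rw [hcp0] at hA2
  -- ---------- B side: the dict of center groups ----------
  set groups := (List.range n).foldl
    (fun (d : PySem.Dict (Int × Int) (List Nat)) (i : Nat) =>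
      d.modify (key i) [] (fun x => x ++ [i])) PySem.Dict.empty with hgroups
  have hkeys : groups.keys = PySem.Set.ofList ((List.range n).map key) := by
    rw [hgroups, PySem.Dict.keys_foldl_modify_key (List.range n) key []
      (fun _ i => fun x => x ++ [i]) PySem.Dict.empty, PySem.Dict.keys_empty]
    rfl
  have hnodup : groups.keys.Nodup := by
    rw [hgroups]
    exact PySem.Dict.nodup_keys_foldl_modify_key (List.range n) key []
      (fun _ i => fun x => x ++ [i]) PySem.Dict.empty PySem.Dict.nodup_keys_empty
  have hgetD : ∀ c, groups.getD c [] = (List.range n).filter (fun i => key i == c) := by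
    intro c
    have hmapfold : groups = ((List.range n).map (fun i => (key i, i))).foldl
        (fun d p => d.modify p.1 [] (fun x => x ++ [p.2])) PySem.Dict.empty := by
      rw [hgroups, List.foldl_map]
    rw [hmapfold, PySem.Dict.getD_foldl_modify_append, PySem.Dict.getD_empty, List.nil_append,
      List.filter_map, List.map_map]
    simp [Function.comp_def]
  have hvalues : groups.values = (PySem.Set.ofList ((List.range n).map key)).map
      (fun c => (List.range n).filter (fun i => key i == c)) := by
    rw [PySem.Dict.values_eq_map_keys groups hnodup [], hkeys]
    apply List.map_congr_left
    intro c _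
    exact hgetD c
  -- ---------- B side: the merge loops ----------
  have hbody : (fun (st : List (Int × Int × Int × Int) × List Bool) (idx : List Nat) =>
      (PySem.List.enumerate idx 0).foldl (fun st q =>
        (PySem.List.slice idx (some (q.1 + 1)) none).foldl
          (fun st j => pvPairStep margin_threshold st (q.2, j)) st) st) =
      (fun st idx => (pvPairsOf idx).foldl (pvPairStep margin_threshold) st) := by
    funext st idx
    exact pv_bgroup margin_threshold idx st
  -- the flattened pair list processed by B equals the grouped form of pairsC
  have hflat : (PySem.Set.ofList ((List.range n).map key)).flatMap
      (fun c => pairsC.filter (fun p => key p.1 == c)) =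
      ((PySem.Set.ofList ((List.range n).map key)).map
        (fun c => (List.range n).filter (fun i => key i == c))).flatMap pvPairsOf := by
    rw [List.flatMap_map]
    apply List.flatMap_congr
    intro c _
    rw [pv_pairsOf_filter (fun i => key i == c) (List.range n), hpairsC, List.filter_filter]
    apply List.filter_congr
    intro p _
    show ((key p.1 == c) && (key p.1 == key p.2)) = ((key p.1 == c) && (key p.2 == c))
    by_cases h1 : key p.1 = c
    · by_cases h2 : key p.2 = c
      · rw [beq_iff_eq.mpr h1, beq_iff_eq.mpr h2, beq_iff_eq.mpr (h1.trans h2.symm)]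
      · have h3 : ¬ key p.1 = key p.2 := fun h => h2 (h ▸ h1)
        rw [beq_false_of_ne h3, beq_false_of_ne h2]
    · rw [beq_false_of_ne h1]
      simp only [Bool.false_and]
  -- commuting across center classes
  have hcomm : ∀ a ∈ pairsC, ∀ b ∈ pairsC, key a.1 ≠ key b.1 →
      ∀ s, pvPairStep margin_threshold (pvPairStep margin_threshold s a) b =
        pvPairStep margin_threshold (pvPairStep margin_threshold s b) a := by
    intro a ha b hb hk s
    have hsa : key a.1 = key a.2 := by
      have := List.of_mem_filter ha
      simpa [hkeydef] using this
    have hsb : key b.1 = key b.2 := by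
      have := List.of_mem_filter hb
      simpa [hkeydef] using this
    refine pvPairStep_comm margin_threshold a b ?_ ?_ ?_ ?_ s
    · exact fun h => hk (congrArg key h)
    · exact fun h => hk (by rw [hsb]; exact congrArg key h)
    · exact fun h => hk (by rw [hsa]; exact congrArg key h)
    · exact fun h => hk (by rw [hsa, hsb]; exact congrArg key h)
  have hgrouped : ((PySem.Set.ofList ((List.range n).map key)).flatMap
      (fun c => pairsC.filter (fun p => key p.1 == c))).foldl (pvPairStep margin_threshold)
        (rects0, List.replicate n false) =
      pairsC.foldl (pvPairStep margin_threshold) (rects0, List.replicate n false) := by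
    refine pv_foldl_groups (pvPairStep margin_threshold) (fun p => key p.1)
      (PySem.Set.ofList ((List.range n).map key)) pairsC _
      (PySem.Set.nodup_ofList _) ?_ hcomm
    intro p hp
    have hmem : p.1 ∈ List.range n := (pv_mem_pairsOf (List.mem_of_mem_filter hp)).1
    exact (PySem.Set.mem_ofList _ _).mpr (List.mem_map_of_mem hmem)
  -- ---------- put the two sides together ----------
  rw [hvalues, hbody, pv_foldl_flatMap, ← hflat, hgrouped, hA1]
  -- now rewrite the A-side final state through the abstraction
  set sA := (pvPairsOf (List.range n)).foldl (pvStepA centers margin_threshold)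
    (rects0, (List.range n).map (fun _ => ([] : List Nat))) with hsA
  set sM := pairsC.foldl (pvPairStep margin_threshold) (rects0, List.replicate n false) with hsM
  have h1 : sA.1 = sM.1 := congrArg Prod.fst hA2
  have h2 : sA.2.map (fun x => !x.isEmpty) = sM.2 := congrArg Prod.snd hA2
  have hlenA : sA.2.length = n := by
    rw [hsA]
    have := (pvStepA_foldl_length centers margin_threshold (pvPairsOf (List.range n))
      (rects0, (List.range n).map (fun _ => ([] : List Nat)))).2
    simpa using this
  have hfilter : (List.range n).filter (fun i => (sA.2.getD i []).length == 0) =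
      (List.range n).filter (fun i => !(sM.2.getD i false)) := by
    apply List.filter_congr
    intro i hi
    have hilt : i < sA.2.length := by
      rw [hlenA]; exact List.mem_range.mp hi
    rw [← h2]
    rw [List.getD_eq_getElem?_getD, List.getD_eq_getElem?_getD, List.getElem?_map,
      List.getElem?_eq_getElem hilt]
    simp [pv_len_eq_isEmpty]
  rw [hfilter, h1]

-- ===== VERDICT (by name: the statement is the Claim_ definition above) =====
theorem marge_rects_if_same_center_spec : Claim_equal_marge_rects_if_same_center := by
  intro input_rects centers margin_threshold _ _
  exact pv_main input_rects centers margin_threshold
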